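-- pv_equiv track=rewrite | github.com/MatsudaSaku/Devin_handson | memory_inefficient.py | load_all_data_at_once
-- ===== SOURCE A (Python) =====
-- from typing import List, Generator
--
-- def load_all_data_at_once(size: int) -> List[int]:
--     """
--     EFFICIENCY ISSUE #11: Loading large datasets into memory unnecessarily
--     Creates large lists when generators or streaming would be more appropriate.
--     """
--     large_list = []
--     for i in range(size):
--         large_list.append(i * i)
--
--     processed = []
--     for item in large_list:
--         if item % 2 == 0:
--             processed.append(item)
--
--     return processed
-- ===== SOURCE B (Python) =====
-- def load_all_data_at_once(size: int):
--     return [i * i for i in range(0, size, 2)]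
-- ===== Notes on version B (the rewrite author's own statement) =====
-- stated objective: simpler
-- what changed: B replaces the build-all-squares pass plus a parity-filter pass by a single comprehension over even indices only (i*i is even iff i is even), never materialising the full square list or testing parity.
import Mathlib
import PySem

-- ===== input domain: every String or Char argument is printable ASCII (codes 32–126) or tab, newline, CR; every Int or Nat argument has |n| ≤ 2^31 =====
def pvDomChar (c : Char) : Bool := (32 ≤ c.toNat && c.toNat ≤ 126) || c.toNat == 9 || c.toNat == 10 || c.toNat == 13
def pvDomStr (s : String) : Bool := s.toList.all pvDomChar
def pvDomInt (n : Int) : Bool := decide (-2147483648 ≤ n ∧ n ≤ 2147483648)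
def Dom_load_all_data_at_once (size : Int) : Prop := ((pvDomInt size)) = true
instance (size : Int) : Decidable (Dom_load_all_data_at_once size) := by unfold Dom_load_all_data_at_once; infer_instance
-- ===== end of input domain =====

-- B collapses A's two passes (build all squares, then filter even ones) into one
-- comprehension over even indices only; equal output, simpler and half the work.

-- ===== PORT A =====
def load_all_data_at_once (size : Int) : List Int :=
  let large_list := (PySem.List.pyRange 0 size 1).foldl (fun acc i => acc ++ [i * i]) []
  large_list.foldl (fun acc item => if PySem.Int.mod item 2 == 0 then acc ++ [item] else acc) []

-- ===== PORT B =====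
def load_all_data_at_once_alt (size : Int) : List Int :=
  (PySem.List.pyRange 0 size 2).map (fun i => i * i)

-- ===== PRECONDITION & SPEC =====
def Spec_load_all_data_at_once (size : Int) (out : List Int) : Prop := out = load_all_data_at_once_alt size
instance (size : Int) (out : List Int) : Decidable (Spec_load_all_data_at_once size out) := by unfold Spec_load_all_data_at_once; infer_instance

-- ===== CLAIM (what is proved, stated in full; the proofs are below) =====
def Claim_equal_load_all_data_at_once : Prop := ∀ (size : Int), Dom_load_all_data_at_once size → Spec_load_all_data_at_once size (load_all_data_at_once size)

-- ===== LEMMAS AND PROOFS =====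

-- the core combinatorial fact over List.range: filtering the even squares out of
-- the first n squares leaves exactly the squares of the even indices
theorem pv_key (n : Nat) :
    ((List.range n).map (fun k : Nat => ((k : Int)) * k)).filter
        (fun x => PySem.Int.mod x 2 == 0)
      = (List.range ((n + 1) / 2)).map (fun k : Nat => ((2 * k : Nat) : Int) * ((2 * k : Nat) : Int)) := by
  induction n using Nat.twoStepInduction with
  | zero => simp
  | one => decide
  | more n ih _ =>
      have h1 : List.range (n + 2) = List.range n ++ [n, n + 1] := by
        rw [List.range_succ, List.range_succ]; simp
      have h2 : (n + 2 + 1) / 2 = (n + 1) / 2 + 1 := by omega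
      rw [h1, h2, List.range_succ]
      simp only [List.map_append, List.filter_append, List.map_cons, List.map_nil, ih]
      congr 1
      rcases Nat.even_or_odd n with he | ho
      · have h : n % 2 = 0 := Nat.even_iff.mp he
        have hn2 : (n : Int) % 2 = 0 := by omega
        have hd1 : (2 : Int) ∣ (n : Int) * n :=
          Dvd.dvd.mul_right (Int.dvd_of_emod_eq_zero hn2) _
        have hd2 : ¬ (2 : Int) ∣ ((n : Int) + 1) * ((n : Int) + 1) := by
          intro hd
          rcases Int.prime_two.dvd_mul.mp hd with hx | hx <;>
            (rcases hx with ⟨c, hc⟩; omega)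
        have hm : 2 * ((n + 1) / 2) = n := by omega
        rw [hm]
        simp [hd1, hd2]
      · have h : n % 2 = 1 := Nat.odd_iff.mp ho
        have hd1 : ¬ (2 : Int) ∣ (n : Int) * n := by
          intro hd
          rcases Int.prime_two.dvd_mul.mp hd with hx | hx <;>
            (rcases hx with ⟨c, hc⟩; omega)
        have hd2 : (2 : Int) ∣ ((n : Int) + 1) * ((n : Int) + 1) :=
          Dvd.dvd.mul_right (Int.dvd_of_emod_eq_zero (by omega)) _
        have hm : 2 * ((n + 1) / 2) = n + 1 := by omega
        rw [hm]
        simp [hd1, hd2]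

-- ===== VERDICT (by name: the statement is the Claim_ definition above) =====
theorem load_all_data_at_once_spec : Claim_equal_load_all_data_at_once := by
  intro size _
  unfold Spec_load_all_data_at_once load_all_data_at_once load_all_data_at_once_alt
  rw [PySem.List.foldl_append_singleton_eq_map, List.nil_append,
      PySem.List.foldl_append_if_eq_filter]
  rw [PySem.List.pyRange_one, PySem.List.pyRange_of_pos 0 size (by norm_num)]
  by_cases hpos : 0 < size
  · have hto : ((size - 0 + 2 - 1) / 2).toNat = (size.toNat + 1) / 2 := by omega
    simp only [if_pos hpos, hto, List.map_map, List.nil_append]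
    have := pv_key size.toNat
    simpa using this
  · have : size.toNat = 0 := by omega
    simp [if_neg hpos, this]
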